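-- pv_equiv track=rewrite | github.com/yeongkyo1997/Algorithm | 프로그래머스/unrated/140105. 쌍둥이 빌딩 숲/쌍둥이 빌딩 숲.py | solution
-- ===== SOURCE A (Python) =====
-- def solution(n, count):
--     MOD = 1000000007
--
--     DP = [[0] * 101 for _ in range(101)]
--
--     for i in range(1, n + 1):
--         DP[i][i] = 1
--
--     for i in range(1, n + 1):
--         for j in range(1, count + 1):
--             if i == j:
--                 continue
--
--             DP[i][j] = (DP[i - 1][j] * 2 * (i - 1)) % MOD + DP[i - 1][j - 1]
--             DP[i][j] %= MOD
--
--     return DP[n][count]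
-- ===== SOURCE B (Python) =====
-- def solution(n, count):
--     MOD = 1000000007
--     if n < 1 or count < 1 or count > n:
--         return 0
--
--     def mul(p, q):
--         return [sum(p[i] * q[k - i] for i in range(len(p)) if 0 <= k - i < len(q)) % MOD
--                 for k in range(len(p) + len(q) - 1)]
--
--     def prod(lo, hi):
--         # coefficient list of the polynomial  product of (x + 2*(i-1)) for i in range(lo, hi)
--         if hi <= lo:
--             return [1]
--         if hi == lo + 1:
--             return [2 * (lo - 1) % MOD, 1]
--         mid = (lo + hi) // 2
--         return mul(prod(lo, mid), prod(mid, hi))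
--
--     return prod(1, n + 1)[count]
-- ===== Notes on version B (the rewrite author's own statement) =====
-- stated objective: alternative
-- what changed: Replaces A's row-by-row 101x101 DP table with divide-and-conquer polynomial multiplication: the answer is the coefficient of x^count in prod_{i=1..n}(x + 2(i-1)), computed by recursively splitting the factor range in half and convolving the two coefficient lists mod 1e9+7, with direct guards for n<1, count<1 and count>n.
-- intended difference: For 1<=n<=100 and count=n-101 (a negative count), A returns 1 because Python's negative-index wraparound DP[n][count] lands on the pre-seeded diagonal cell DP[n][n], while B returns 0, the intended answer for a negative building count. — e.g. on solution(1, -100): A returns 1, B returns 0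
import Mathlib
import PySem

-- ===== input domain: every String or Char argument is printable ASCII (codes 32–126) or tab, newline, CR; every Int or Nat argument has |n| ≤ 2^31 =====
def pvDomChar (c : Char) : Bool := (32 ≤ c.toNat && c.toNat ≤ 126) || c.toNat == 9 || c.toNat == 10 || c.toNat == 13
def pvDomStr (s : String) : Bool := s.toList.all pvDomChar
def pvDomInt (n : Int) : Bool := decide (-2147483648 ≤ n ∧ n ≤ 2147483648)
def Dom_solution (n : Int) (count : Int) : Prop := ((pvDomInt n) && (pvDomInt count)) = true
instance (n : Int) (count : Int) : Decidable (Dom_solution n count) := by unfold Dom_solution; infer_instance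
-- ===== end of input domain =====

-- B replaces A's row-by-row 101x101 DP table with a completely different algorithm:
-- divide-and-conquer polynomial multiplication — the answer is the coefficient of
-- x^count in prod_{i=1..n}(x + 2(i-1)), computed by recursively splitting the factor
-- range in half and convolving the two coefficient lists (objective: alternative).
-- Both ports model Python mutable lists/tables functionally; every index is the
-- Python index, and A's final read applies Python's negative-index wraparound
-- explicitly (exact on Pre_, where all live indices are in range).

def pvMOD : Int := 1000000007

-- ===== PORT A =====
-- The Python 101x101 table of mutable lists is modeled as a store of point writes
-- (most recent write first); sGet reads a cell (0 for a never-written cell, which is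
-- exactly the 0-initialised table).
def sGet : List ((Int × Int) × Int) → Int → Int → Int
  | [], _, _ => 0
  | (e :: rest), r, c => if r = e.1.1 ∧ c = e.1.2 then e.2 else sGet rest r c

-- DP[i][i] = 1
def aDiagBody (dp : List ((Int × Int) × Int)) (i : Int) : List ((Int × Int) × Int) :=
  ((i, i), 1) :: dp

-- one iteration of the inner j-loop: if i == j: continue; else DP[i][j] = …; DP[i][j] %= MOD
-- (the write and the immediately following %= are one combined store update)
def aCellBody (i : Int) (dp : List ((Int × Int) × Int)) (j : Int) : List ((Int × Int) × Int) :=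
  if i = j then dp
  else ((i, j), ((sGet dp (i-1) j * 2 * (i-1)) % pvMOD + sGet dp (i-1) (j-1)) % pvMOD) :: dp

-- the inner 'for j in range(1, count+1)' loop
def aRowBody (count : Int) (dp : List ((Int × Int) × Int)) (i : Int) : List ((Int × Int) × Int) :=
  (PySem.List.pyRange 1 (count+1) 1).foldl (aCellBody i) dp

def solution (n : Int) (count : Int) : Int :=
  let dp1 := (PySem.List.pyRange 1 (n+1) 1).foldl aDiagBody []
  let dp2 := (PySem.List.pyRange 1 (n+1) 1).foldl (aRowBody count) dp1
  -- DP[n][count] with Python's negative-index wraparound written out (exact on Pre_)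
  sGet dp2 (if n < 0 then n + 101 else n) (if count < 0 then count + 101 else count)

-- ===== PORT B =====
-- mul(p, q): coefficient k of the product polynomial is the convolution sum
-- sum(p[i] * q[k-i] for i in range(len(p)) if 0 <= k - i < len(q)) % MOD,
-- one entry per k in range(len(p) + len(q) - 1)
def bMul (p q : List Int) : List Int :=
  (List.range (p.length + q.length - 1)).map (fun k =>
    ((List.range p.length).foldl
      (fun s i => if i ≤ k ∧ k - i < q.length then s + p.getD i 0 * q.getD (k - i) 0 else s) 0)
    % pvMOD)

-- prod(lo, hi): coefficient list of prod of (x + 2*(i-1)) for i in range(lo, hi),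
-- by splitting the range at mid = (lo + hi) // 2
def bProd (lo hi : Int) : List Int :=
  if hi ≤ lo then [1]
  else if hi = lo + 1 then [2 * (lo - 1) % pvMOD, 1]
  else
    bMul (bProd lo (PySem.Int.floordiv (lo + hi) 2))
         (bProd (PySem.Int.floordiv (lo + hi) 2) hi)
termination_by (hi - lo).toNat
decreasing_by
  all_goals rw [PySem.Int.floordiv_eq_ediv_of_pos (by omega : (0:Int) < 2)]
  all_goals omega

def solution_alt (n : Int) (count : Int) : Int :=
  if n < 1 ∨ count < 1 ∨ count > n then 0
  -- prod(1, n + 1)[count]; the index is provably in range (1 ≤ count ≤ n < length)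
  else (bProd 1 (n + 1)).getD count.toNat 0

-- ===== PRECONDITION & SPEC =====
-- Pre_ excludes exactly the inputs on which the Python A raises IndexError:
-- n > 100 or count > 100 (writes/reads past the fixed 101-wide table) and
-- n < -101 or count < -101 (negative index beyond wraparound range).
def Pre_solution (n : Int) (count : Int) : Prop :=
  -101 ≤ n ∧ n ≤ 100 ∧ -101 ≤ count ∧ count ≤ 100
instance (n : Int) (count : Int) : Decidable (Pre_solution n count) := by
  unfold Pre_solution; infer_instance
def pvWitness_solution : Int × Int := (3, 2)

-- For 1 ≤ n ≤ 100 and count = n - 101 (a negative count), A returns 1 because Python's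
-- negative-index wraparound makes DP[n][count] read the pre-seeded diagonal cell DP[n][n],
-- while B returns 0, the intended answer for a negative building count.
def D_solution (n : Int) (count : Int) : Prop := 1 ≤ n ∧ n ≤ 100 ∧ count = n - 101
instance (n : Int) (count : Int) : Decidable (D_solution n count) := by
  unfold D_solution; infer_instance

def Spec_solution (n : Int) (count : Int) (out : Int) : Prop :=
  ¬ D_solution n count → out = solution_alt n count
instance (n : Int) (count : Int) (out : Int) : Decidable (Spec_solution n count out) := by
  unfold Spec_solution; infer_instance

def pvDiffWitness_solution : Int × Int := (1, -100)
def pvDiffWitnessOut_solution : Int × Int := (1, 0)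

-- ===== CLAIM (what is proved, stated in full; the proofs are below) =====
def Claim_unchanged_solution : Prop := ∀ (n : Int) (count : Int), Dom_solution n count →
  Pre_solution n count → Spec_solution n count (solution n count)
def Claim_changed_solution : Prop :=
  Dom_solution (pvDiffWitness_solution.1) (pvDiffWitness_solution.2) ∧
  Pre_solution (pvDiffWitness_solution.1) (pvDiffWitness_solution.2) ∧
  D_solution (pvDiffWitness_solution.1) (pvDiffWitness_solution.2) ∧
  solution (pvDiffWitness_solution.1) (pvDiffWitness_solution.2) = pvDiffWitnessOut_solution.1 ∧
  solution_alt (pvDiffWitness_solution.1) (pvDiffWitness_solution.2) = pvDiffWitnessOut_solution.2 ∧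
  pvDiffWitnessOut_solution.1 ≠ pvDiffWitnessOut_solution.2
def Claim_exact_solution : Prop := ∀ (n : Int) (count : Int), Dom_solution n count →
  Pre_solution n count → D_solution n count → solution n count ≠ solution_alt n count

-- ===== LEMMAS AND PROOFS =====

-- coefficient of x^j in prod_{i=1..it} (x + 2(i-1)), reduced mod pvMOD at every step
-- (this is exactly the value A's table holds; B is related to it through polynomials)
def pvC : Nat → Int → Int
  | 0, j => if j = 0 then 1 else 0
  | it+1, j => if j < 0 then 0 else (pvC it j * (2*(it:Int)) + pvC it (j-1)) % pvMOD

theorem pvC_neg (it : Nat) (j : Int) (h : j < 0) : pvC it j = 0 := by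
  cases it with
  | zero => rw [pvC, if_neg (by omega)]
  | succ p => rw [pvC, if_pos h]

theorem pvC_gt (it : Nat) (j : Int) (h : (it:Int) < j) : pvC it j = 0 := by
  induction it generalizing j with
  | zero => rw [pvC, if_neg (by omega)]
  | succ p ih =>
    rw [pvC, if_neg (by push_cast at h; omega), ih j (by push_cast at h; omega),
      ih (j-1) (by push_cast at h; omega)]
    simp

theorem pvC_diag (it : Nat) : pvC it (it:Int) = 1 := by
  induction it with
  | zero => decide
  | succ p ih =>
    rw [show ((p+1 : Nat) : Int) = (p:Int)+1 from by push_cast; ring, pvC, if_neg (by omega),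
      pvC_gt p ((p:Int)+1) (by omega), show (p:Int)+1-1 = (p:Int) from by ring, ih]
    norm_num [pvMOD]

theorem pvC_zero : ∀ it : Nat, 1 ≤ it → pvC it 0 = 0
  | 1, _ => by decide
  | (q+2), _ => by
    rw [pvC, if_neg (by omega), show (0:Int)-1 = -1 from by norm_num,
      pvC_neg (q+1) (-1) (by omega), pvC_zero (q+1) (by omega)]
    simp

theorem pvC_diag' (i : Int) (h : 0 ≤ i) : pvC i.toNat i = 1 := by
  have h2 := pvC_diag i.toNat
  rwa [Int.toNat_of_nonneg h] at h2

theorem pvC_zero' (i : Int) (h : 1 ≤ i) : pvC i.toNat 0 = 0 := pvC_zero i.toNat (by omega)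

theorem pv_mod_add (a b : Int) : (a % pvMOD + b) % pvMOD = (a + b) % pvMOD := by
  conv_rhs => rw [Int.add_emod]
  rw [Int.add_emod (a % pvMOD) b, Int.emod_emod_of_dvd a dvd_rfl]

theorem pv_foldl_const {α β : Type} (l : List β) (s : α) :
    l.foldl (fun a _ => a) s = s := by
  induction l generalizing s with
  | nil => rfl
  | cons x xs ih => exact ih s

-- row r of the table after the diagonal-seeding loop ran for i = 1..m
def diagModel (m : Int) : Int → Int → Int := fun r c => if 1 ≤ r ∧ r ≤ m ∧ c = r then 1 else 0

-- the table after the main loop processed rows 1..k (count = column bound, n = table bound)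
def modelA (n count k : Int) : Int → Int → Int := fun r c =>
  if 1 ≤ r ∧ r ≤ k ∧ 0 ≤ c ∧ (c ≤ count ∨ c = r) then pvC r.toNat c
  else if k < r ∧ r ≤ n ∧ c = r then 1 else 0

-- the table while the inner loop fills row i, columns 1..j₀ done
def stateAI (n count i j₀ : Int) : Int → Int → Int := fun r c =>
  if r = i ∧ 1 ≤ c ∧ c ≤ j₀ then pvC i.toNat c else modelA n count (i-1) r c

theorem sGet_cons (i j v : Int) (dp : List ((Int × Int) × Int)) (r c : Int) :
    sGet (((i, j), v) :: dp) r c = if r = i ∧ c = j then v else sGet dp r c := rfl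

theorem diag_fold (t : Nat) (r c : Int) :
    sGet ((PySem.List.pyRange 1 ((t:Int)+1) 1).foldl aDiagBody []) r c = diagModel (t:Int) r c := by
  induction t with
  | zero =>
    rw [PySem.List.pyRange_one_eq_nil (by omega)]
    simp only [List.foldl_nil, diagModel, Nat.cast_zero, sGet]
    split_ifs <;> first | rfl | omega | (exfalso; omega)
  | succ p ih =>
    have e : ((p+1 : Nat) : Int) = (p:Int) + 1 := by push_cast; ring
    rw [e, PySem.List.pyRange_one_succ_right (by omega), List.foldl_append]
    simp only [List.foldl_cons, List.foldl_nil, aDiagBody, sGet_cons]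
    rw [ih]
    simp only [diagModel]
    split_ifs <;> first | rfl | omega | (exfalso; omega)

theorem stateAI_zero (n count i : Int) : stateAI n count i 0 = modelA n count (i-1) := by
  funext r c
  simp only [stateAI]
  rw [if_neg (by omega)]

theorem stateAI_count (n count i : Int) (hi1 : 1 ≤ i) (hin : i ≤ n) (hc : 0 ≤ count) :
    stateAI n count i count = modelA n count i := by
  funext r c
  simp only [stateAI, modelA]
  by_cases hr : r = i
  · rw [hr]
    by_cases h1 : 1 ≤ c ∧ c ≤ count
    · rw [if_pos ⟨rfl, h1.1, h1.2⟩, if_pos ⟨hi1, le_rfl, by omega, Or.inl h1.2⟩]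
    · by_cases hc0 : c = 0
      · rw [hc0, if_neg (by omega), if_neg (by omega), if_neg (by omega),
          if_pos ⟨hi1, le_rfl, le_rfl, Or.inl hc⟩, pvC_zero' i hi1]
      · by_cases hcr : c = i
        · rw [hcr, if_neg (by omega), if_neg (by omega),
            if_pos ⟨show i-1 < i by omega, hin, rfl⟩,
            if_pos ⟨hi1, le_rfl, by omega, Or.inr rfl⟩, pvC_diag' i (by omega)]
        · rw [if_neg (by omega), if_neg (by omega), if_neg (by omega), if_neg (by omega),
            if_neg (by omega)]
  · rw [if_neg (fun h => hr h.1)]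
    by_cases h1 : 1 ≤ r ∧ r ≤ i ∧ 0 ≤ c ∧ (c ≤ count ∨ c = r)
    · rw [if_pos ⟨h1.1, by omega, h1.2.2.1, h1.2.2.2⟩, if_pos h1]
    · rw [if_neg (by intro h; exact h1 ⟨h.1, by omega, h.2.2.1, h.2.2.2⟩), if_neg h1]
      by_cases h2 : i < r ∧ r ≤ n ∧ c = r
      · rw [if_pos ⟨by omega, h2.2.1, h2.2.2⟩, if_pos h2]
      · rw [if_neg (by intro h; exact h2 ⟨by omega, h.2.1, h.2.2⟩), if_neg h2]

theorem stepA (n count i j : Int) (hi1 : 1 ≤ i) (hin : i ≤ n) (hj1 : 1 ≤ j) (hjc : j ≤ count)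
    (dp : List ((Int × Int) × Int))
    (hdp : ∀ r c, sGet dp r c = stateAI n count i (j-1) r c) (r c : Int) :
    sGet (aCellBody i dp j) r c = stateAI n count i j r c := by
  by_cases hij : i = j
  · rw [aCellBody, if_pos hij, hdp r c]
    simp only [stateAI]
    by_cases h1 : r = i ∧ 1 ≤ c ∧ c ≤ j
    · by_cases h2 : c = j
      · rw [if_neg (by omega), if_pos h1, h1.1, h2]
        simp only [modelA]
        rw [if_neg (by omega), if_pos ⟨show i-1 < i by omega, hin, by omega⟩, ← hij,
          pvC_diag' i (by omega)]
      · rw [if_pos ⟨h1.1, h1.2.1, by omega⟩, if_pos h1]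
    · rw [if_neg (by intro h; exact h1 ⟨h.1, h.2.1, by omega⟩), if_neg h1]
  · rw [aCellBody, if_neg hij, sGet_cons]
    have hread1 : sGet dp (i-1) j = pvC (i.toNat - 1) j := by
      rw [hdp]
      simp only [stateAI]
      rw [if_neg (by omega)]
      simp only [modelA]
      by_cases h1 : 1 ≤ i - 1
      · rw [if_pos ⟨h1, le_rfl, by omega, Or.inl hjc⟩]
        congr 1
        omega
      · rw [if_neg (by omega), if_neg (by omega), show i.toNat - 1 = 0 from by omega,
          pvC_gt 0 j (by omega)]
    have hread2 : sGet dp (i-1) (j-1) = pvC (i.toNat - 1) (j-1) := by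
      rw [hdp]
      simp only [stateAI]
      rw [if_neg (by omega)]
      simp only [modelA]
      by_cases h1 : 1 ≤ i - 1
      · rw [if_pos ⟨h1, le_rfl, by omega, Or.inl (by omega)⟩]
        congr 1
        omega
      · -- i = 1 and j ≠ i with 1 ≤ j forces 2 ≤ j, so j-1 ≥ 1
        rw [if_neg (by omega), if_neg (by omega), show i.toNat - 1 = 0 from by omega,
          pvC_gt 0 (j-1) (by omega)]
    by_cases hrc : r = i ∧ c = j
    · have hr2 : stateAI n count i j i j = pvC i.toNat j := by
        simp only [stateAI]
        rw [if_pos ⟨trivial, hj1, le_rfl⟩]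
      rw [if_pos hrc, hrc.1, hrc.2, hread1, hread2, hr2]
      obtain ⟨p, hp⟩ : ∃ p : Nat, i.toNat = p + 1 := ⟨i.toNat - 1, by omega⟩
      rw [hp, Nat.add_sub_cancel, pvC, if_neg (by omega), pv_mod_add,
        show (p:Int) = i - 1 from by omega]
      congr 1
      ring
    · rw [if_neg hrc, hdp]
      simp only [stateAI]
      by_cases h1 : r = i ∧ 1 ≤ c ∧ c ≤ j - 1
      · rw [if_pos h1, if_pos ⟨h1.1, h1.2.1, by omega⟩]
      · rw [if_neg h1, if_neg (by
          intro h
          by_cases hcj : c = j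
          · exact hrc ⟨h.1, hcj⟩
          · exact h1 ⟨h.1, h.2.1, by omega⟩)]

theorem innerA_fold (n count i : Int) (hi1 : 1 ≤ i) (hin : i ≤ n) :
    ∀ s : Nat, (s:Int) ≤ count →
      ∀ dp : List ((Int × Int) × Int),
        (∀ r c, sGet dp r c = stateAI n count i 0 r c) →
        ∀ r c, sGet ((PySem.List.pyRange 1 ((s:Int)+1) 1).foldl (aCellBody i) dp) r c
          = stateAI n count i (s:Int) r c := by
  intro s
  induction s with
  | zero =>
    intro _ dp hdp r c
    rw [PySem.List.pyRange_one_eq_nil (by omega)]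
    simpa using hdp r c
  | succ p ih =>
    intro hs dp hdp r c
    have e : ((p+1 : Nat) : Int) = (p:Int) + 1 := by push_cast; ring
    rw [e, PySem.List.pyRange_one_succ_right (by omega), List.foldl_append]
    simp only [List.foldl_cons, List.foldl_nil]
    have h := stepA n count i ((p:Int)+1) hi1 hin (by omega) (by push_cast at hs; omega)
      ((PySem.List.pyRange 1 ((p:Int)+1) 1).foldl (aCellBody i) dp)
      (by
        intro r' c'
        rw [show ((p:Int)+1-1) = (p:Int) from by ring]
        exact ih (by push_cast at hs; omega) dp hdp r' c') r c
    exact h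

theorem rowA (n count i : Int) (hi1 : 1 ≤ i) (hin : i ≤ n) (hc : 1 ≤ count)
    (dp : List ((Int × Int) × Int))
    (hdp : ∀ r c, sGet dp r c = modelA n count (i-1) r c) (r c : Int) :
    sGet (aRowBody count dp i) r c = modelA n count i r c := by
  obtain ⟨s, hs⟩ : ∃ s : Nat, (s:Int) = count := ⟨count.toNat, by omega⟩
  subst hs
  unfold aRowBody
  rw [innerA_fold n (↑s) i hi1 hin s le_rfl dp
    (by intro r' c'; rw [hdp r' c', ← stateAI_zero n (↑s) i]),
    stateAI_count n (↑s) i hi1 hin (by omega)]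

theorem outerA (n count : Int) (hc : 1 ≤ count) :
    ∀ t : Nat, (t:Int) ≤ n →
      ∀ dp : List ((Int × Int) × Int),
        (∀ r c, sGet dp r c = diagModel n r c) →
        ∀ r c, sGet ((PySem.List.pyRange 1 ((t:Int)+1) 1).foldl (aRowBody count) dp) r c
          = modelA n count (t:Int) r c := by
  intro t
  induction t with
  | zero =>
    intro _ dp hdp r c
    rw [PySem.List.pyRange_one_eq_nil (by omega)]
    simp only [List.foldl_nil]
    rw [hdp r c]
    simp only [diagModel, modelA, Nat.cast_zero]
    split_ifs <;> first | rfl | omega | (exfalso; omega)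
  | succ p ih =>
    intro hs dp hdp r c
    have e : ((p+1 : Nat) : Int) = (p:Int) + 1 := by push_cast; ring
    rw [e, PySem.List.pyRange_one_succ_right (by omega), List.foldl_append]
    simp only [List.foldl_cons, List.foldl_nil]
    have h := rowA n count ((p:Int)+1) (by omega) (by push_cast at hs; omega) hc
      ((PySem.List.pyRange 1 ((p:Int)+1) 1).foldl (aRowBody count) dp)
      (by
        intro r' c'
        rw [show ((p:Int)+1-1) = (p:Int) from by ring]
        exact ih (by push_cast at hs; omega) dp hdp r' c') r c
    exact h

theorem mainA (n count : Int) (hn : 1 ≤ n) (hc : 1 ≤ count) :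
    solution n count = pvC n.toNat count := by
  obtain ⟨t, ht⟩ : ∃ t : Nat, (t:Int) = n := ⟨n.toNat, by omega⟩
  subst ht
  simp only [solution]
  rw [outerA (↑t) count hc t le_rfl _ (fun r c => diag_fold t r c), if_neg (by omega),
    if_neg (by omega)]
  simp only [modelA]
  rw [if_pos ⟨hn, le_rfl, by omega, Or.inl le_rfl⟩]

-- ===== B side: via polynomials over ZMod 1000000007 =====

noncomputable def fpoly (lo hi : Int) : Polynomial (ZMod 1000000007) :=
  ∏ i ∈ Finset.Ico lo hi, (Polynomial.X + Polynomial.C (((2*(i-1) : Int)) : ZMod 1000000007))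

theorem castM : ((pvMOD : Int) : ZMod 1000000007) = 0 := by
  rw [show pvMOD = (1000000007 : Int) from rfl, ZMod.intCast_zmod_eq_zero_iff_dvd]
  norm_num

theorem cast_emod (a : Int) : ((a % pvMOD : Int) : ZMod 1000000007) = (a : ZMod 1000000007) := by
  rw [Int.emod_def, Int.cast_sub, Int.cast_mul, castM, zero_mul, sub_zero]

theorem fpoly_empty (lo hi : Int) (h : hi ≤ lo) : fpoly lo hi = 1 := by
  rw [fpoly, Finset.Ico_eq_empty_of_le h, Finset.prod_empty]

theorem fpoly_mul (lo mid hi : Int) (h1 : lo ≤ mid) (h2 : mid ≤ hi) :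
    fpoly lo mid * fpoly mid hi = fpoly lo hi := by
  rw [fpoly, fpoly, fpoly,
    ← Finset.prod_union (Finset.Ico_disjoint_Ico_consecutive lo mid hi),
    Finset.Ico_union_Ico_eq_Ico h1 h2]

theorem fpoly_single (lo : Int) :
    fpoly lo (lo+1) = Polynomial.X + Polynomial.C (((2*(lo-1) : Int)) : ZMod 1000000007) := by
  rw [fpoly, show Finset.Ico lo (lo+1) = {lo} from by ext x; simp [Finset.mem_Ico]; omega,
    Finset.prod_singleton]

theorem fpoly_natDegree (lo hi : Int) : (fpoly lo hi).natDegree = (hi - lo).toNat := by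
  by_cases h : hi ≤ lo
  · rw [fpoly_empty lo hi h, Polynomial.natDegree_one]
    omega
  · haveI : Fact (1 < 1000000007) := ⟨by norm_num⟩
    rw [fpoly, Polynomial.natDegree_prod_of_monic _ _
      (fun i _ => Polynomial.monic_X_add_C _)]
    rw [Finset.sum_congr rfl (fun i _ => Polynomial.natDegree_X_add_C _), Finset.sum_const,
      Int.card_Ico, smul_eq_mul, mul_one]

theorem fpoly_coeff_zero (lo hi : Int) (k : Nat) (hk : (hi - lo).toNat < k) :
    (fpoly lo hi).coeff k = 0 :=
  Polynomial.coeff_eq_zero_of_natDegree_lt (by rw [fpoly_natDegree]; omega)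

theorem pvC_cast : ∀ (it : Nat) (j : Nat),
    ((pvC it (j:Int) : Int) : ZMod 1000000007) = (fpoly 1 ((it:Int)+1)).coeff j := by
  intro it
  induction it with
  | zero =>
    intro j
    rw [show ((0:Nat):Int) + 1 = 1 from by norm_num, fpoly_empty 1 1 le_rfl,
      Polynomial.coeff_one]
    cases j with
    | zero => rw [pvC, if_pos rfl]; norm_num
    | succ m => rw [pvC, if_neg (by omega)]; norm_num
  | succ it ih =>
    intro j
    have hsplit : fpoly 1 (((it+1:Nat):Int)+1)
        = fpoly 1 ((it:Int)+1) * (Polynomial.X + Polynomial.C (((2*(it:Int) : Int)) : ZMod 1000000007)) := by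
      rw [show (((it+1:Nat):Int)+1) = ((it:Int)+1)+1 from by push_cast; ring,
        ← fpoly_mul 1 ((it:Int)+1) (((it:Int)+1)+1) (by omega) (by omega), fpoly_single]
      norm_num
    rw [hsplit, pvC, if_neg (by omega), cast_emod, Int.cast_add, Int.cast_mul, mul_add,
      Polynomial.coeff_add, Polynomial.coeff_mul_C]
    cases j with
    | zero =>
      rw [Polynomial.coeff_mul_X_zero, show ((0:Nat):Int) - 1 = -1 from by norm_num,
        pvC_neg it (-1) (by omega), ih 0]
      push_cast
      ring
    | succ m =>
      rw [Polynomial.coeff_mul_X, show (((m+1:Nat)):Int) - 1 = ((m:Nat):Int) from by push_cast; ring,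
        ih (m+1), ih m]
      push_cast
      ring

theorem bMul_length (p q : List Int) : (bMul p q).length = p.length + q.length - 1 := by
  simp [bMul]

theorem bMul_mem (p q : List Int) (x : Int) (hx : x ∈ bMul p q) : 0 ≤ x ∧ x < pvMOD := by
  simp only [bMul, List.mem_map] at hx
  obtain ⟨k, -, rfl⟩ := hx
  exact ⟨Int.emod_nonneg _ (by norm_num [pvMOD]), Int.emod_lt_of_pos _ (by norm_num [pvMOD])⟩

theorem foldl_if_sum (m : Nat) (P : Nat → Prop) [DecidablePred P] (f : Nat → Int) :
    (List.range m).foldl (fun s i => if P i then s + f i else s) 0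
      = ∑ i ∈ Finset.range m, if P i then f i else 0 := by
  rw [show (fun (s:Int) i => if P i then s + f i else s)
      = (fun (s:Int) i => s + if P i then f i else 0) from by
    funext s i; split_ifs <;> simp, PySem.List.foldl_add]
  exact (zero_add _).trans rfl

theorem conv_sum (F G : Polynomial (ZMod 1000000007)) (Lp Lq k : Nat)
    (hF : ∀ i, Lp ≤ i → F.coeff i = 0) (hG : ∀ j, Lq ≤ j → G.coeff j = 0) :
    (∑ i ∈ Finset.range Lp, if i ≤ k ∧ k - i < Lq then F.coeff i * G.coeff (k-i) else 0)
      = (F * G).coeff k := by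
  rw [Polynomial.coeff_mul, Finset.Nat.sum_antidiagonal_eq_sum_range_succ_mk]
  have hsub1 : Finset.range Lp ⊆ Finset.range (max Lp (k+1)) := by
    intro x hx
    simp only [Finset.mem_range] at hx ⊢
    omega
  have hsub2 : Finset.range (k+1) ⊆ Finset.range (max Lp (k+1)) := by
    intro x hx
    simp only [Finset.mem_range] at hx ⊢
    omega
  have e1 : (∑ i ∈ Finset.range Lp, if i ≤ k ∧ k - i < Lq then F.coeff i * G.coeff (k-i) else 0)
      = ∑ i ∈ Finset.range (max Lp (k+1)), if i ≤ k ∧ k - i < Lq then F.coeff i * G.coeff (k-i) else 0 := by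
    apply Finset.sum_subset hsub1
    intro i hi hni
    have hLp : Lp ≤ i := by simp only [Finset.mem_range] at hni; omega
    split_ifs with h
    · rw [hF i hLp, zero_mul]
    · rfl
  have e2 : (∑ i ∈ Finset.range (k+1), F.coeff i * G.coeff (k-i))
      = ∑ i ∈ Finset.range (max Lp (k+1)), if i ≤ k then F.coeff i * G.coeff (k-i) else 0 := by
    have e2a : (∑ i ∈ Finset.range (k+1), F.coeff i * G.coeff (k-i))
        = ∑ i ∈ Finset.range (k+1), if i ≤ k then F.coeff i * G.coeff (k-i) else 0 :=
      Finset.sum_congr rfl (fun i hi =>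
        (if_pos (by simp only [Finset.mem_range] at hi; omega)).symm)
    rw [e2a]
    exact Finset.sum_subset hsub2 (fun i _ hni =>
      if_neg (by simp only [Finset.mem_range] at hni; omega))
  rw [e1, e2]
  apply Finset.sum_congr rfl
  intro i _
  by_cases h1 : i ≤ k
  · by_cases h2 : k - i < Lq
    · rw [if_pos ⟨h1, h2⟩, if_pos h1]
    · rw [if_neg (fun h => h2 h.2), if_pos h1, hG (k-i) (by omega), mul_zero]
  · rw [if_neg (fun h => h1 h.1), if_neg h1]

theorem bProd_length : ∀ (m : Nat) (lo hi : Int), (hi - lo).toNat ≤ m →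
    (bProd lo hi).length = (hi - lo).toNat + 1 := by
  intro m
  induction m with
  | zero =>
    intro lo hi hm
    rw [bProd, if_pos (by omega)]
    simp
    omega
  | succ m ih =>
    intro lo hi hm
    by_cases h1 : hi ≤ lo
    · rw [bProd, if_pos h1]
      simp
      omega
    · by_cases h2 : hi = lo + 1
      · rw [bProd, if_neg h1, if_pos h2]
        simp
        omega
      · rw [bProd, if_neg h1, if_neg h2]
        have hmid : lo + 1 ≤ PySem.Int.floordiv (lo + hi) 2
            ∧ PySem.Int.floordiv (lo + hi) 2 + 1 ≤ hi := by
          rw [PySem.Int.floordiv_eq_ediv_of_pos (by omega : (0:Int) < 2)]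
          omega
        rw [bMul_length, ih lo _ (by omega), ih _ hi (by omega)]
        omega

theorem bProd_mem : ∀ (m : Nat) (lo hi : Int), (hi - lo).toNat ≤ m →
    ∀ x ∈ bProd lo hi, 0 ≤ x ∧ x < pvMOD := by
  intro m lo hi hm x hx
  rw [bProd] at hx
  split_ifs at hx with h1 h2
  · simp only [List.mem_singleton] at hx
    subst hx
    norm_num [pvMOD]
  · simp only [List.mem_cons, List.mem_singleton, List.not_mem_nil, or_false] at hx
    rcases hx with hx | hx <;> subst hx
    · exact ⟨Int.emod_nonneg _ (by norm_num [pvMOD]), Int.emod_lt_of_pos _ (by norm_num [pvMOD])⟩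
    · norm_num [pvMOD]
  · exact bMul_mem _ _ _ hx

theorem bProd_coeff : ∀ (m : Nat) (lo hi : Int), (hi - lo).toNat ≤ m → ∀ k : Nat,
    (((bProd lo hi).getD k 0 : Int) : ZMod 1000000007) = (fpoly lo hi).coeff k := by
  intro m
  induction m with
  | zero =>
    intro lo hi hm k
    rw [bProd, if_pos (by omega : hi ≤ lo), fpoly_empty lo hi (by omega), Polynomial.coeff_one]
    cases k with
    | zero => norm_num
    | succ j => norm_num
  | succ m ih =>
    intro lo hi hm k
    by_cases h1 : hi ≤ lo
    · rw [bProd, if_pos h1, fpoly_empty lo hi h1, Polynomial.coeff_one]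
      cases k with
      | zero => norm_num
      | succ j => norm_num
    · by_cases h2 : hi = lo + 1
      · rw [bProd, if_neg h1, if_pos h2, h2, fpoly_single, Polynomial.coeff_add]
        match k with
        | 0 =>
          rw [Polynomial.coeff_X_zero, Polynomial.coeff_C_zero, zero_add]
          exact cast_emod _
        | 1 =>
          rw [Polynomial.coeff_X_one, Polynomial.coeff_C_ne_zero (by omega), add_zero]
          norm_num
        | (j+2) =>
          rw [Polynomial.coeff_X, if_neg (by omega), Polynomial.coeff_C_ne_zero (by omega)]
          norm_num
      · rw [bProd, if_neg h1, if_neg h2]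
        have hmid : lo + 1 ≤ PySem.Int.floordiv (lo + hi) 2
            ∧ PySem.Int.floordiv (lo + hi) 2 + 1 ≤ hi := by
          rw [PySem.Int.floordiv_eq_ediv_of_pos (by omega : (0:Int) < 2)]
          omega
        set mid := PySem.Int.floordiv (lo + hi) 2 with hmiddef
        have hLp := bProd_length m lo mid (by omega)
        have hLq := bProd_length m mid hi (by omega)
        have hFz : ∀ i : Nat, (bProd lo mid).length ≤ i → (fpoly lo mid).coeff i = 0 := by
          intro i hi2
          exact fpoly_coeff_zero lo mid i (by omega)
        have hGz : ∀ j : Nat, (bProd mid hi).length ≤ j → (fpoly mid hi).coeff j = 0 := by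
          intro j hj2
          exact fpoly_coeff_zero mid hi j (by omega)
        rw [← fpoly_mul lo mid hi (by omega) (by omega)]
        by_cases hk : k < (bProd lo mid).length + (bProd mid hi).length - 1
        · rw [show (bMul (bProd lo mid) (bProd mid hi)).getD k 0
              = ((List.range (bProd lo mid).length).foldl
                  (fun s i => if i ≤ k ∧ k - i < (bProd mid hi).length then
                    s + (bProd lo mid).getD i 0 * (bProd mid hi).getD (k - i) 0 else s) 0)
                % pvMOD from by
            simp only [bMul]
            rw [PySem.List.getD_map_range _ _ _ _ hk]]
          rw [cast_emod, foldl_if_sum _ (fun i => i ≤ k ∧ k - i < (bProd mid hi).length), Int.cast_sum]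
          rw [← conv_sum (fpoly lo mid) (fpoly mid hi) (bProd lo mid).length
            (bProd mid hi).length k hFz hGz]
          apply Finset.sum_congr rfl
          intro i _
          rw [apply_ite (fun z : Int => (z : ZMod 1000000007))]
          split_ifs with h
          · rw [Int.cast_mul, ih lo mid (by omega) i, ih mid hi (by omega) (k-i)]
          · norm_num
        · rw [List.getD_eq_default _ _ (by rw [bMul_length]; omega)]
          rw [show ((0:Int) : ZMod 1000000007) = 0 from by norm_num,
            fpoly_mul lo mid hi (by omega) (by omega), fpoly_coeff_zero lo hi k (by omega)]

theorem pvPos : (0:Int) < pvMOD := by norm_num [pvMOD]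

theorem cast_inj_range (a b : Int) (ha : 0 ≤ a ∧ a < pvMOD) (hb : 0 ≤ b ∧ b < pvMOD)
    (h : (a : ZMod 1000000007) = (b : ZMod 1000000007)) : a = b := by
  rw [ZMod.intCast_eq_intCast_iff] at h
  have h2 : a % (1000000007:Int) = b % (1000000007:Int) := h
  have ha' := ha
  have hb' := hb
  simp only [pvMOD] at ha' hb'
  omega

theorem pvC_range : ∀ (it : Nat) (j : Int), 0 ≤ pvC it j ∧ pvC it j < pvMOD := by
  intro it
  induction it with
  | zero =>
    intro j
    rw [pvC]
    split_ifs <;> norm_num [pvMOD]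
  | succ p ih =>
    intro j
    rw [pvC]
    split_ifs
    · norm_num [pvMOD]
    · exact ⟨Int.emod_nonneg _ (by norm_num [pvMOD]), Int.emod_lt_of_pos _ pvPos⟩

theorem mainB (n count : Int) (hn : 1 ≤ n) (hc : 1 ≤ count) (hcn : count ≤ n) :
    solution_alt n count = pvC n.toNat count := by
  simp only [solution_alt]
  rw [if_neg (by omega)]
  have hlen := bProd_length (n+1-1).toNat 1 (n+1) le_rfl
  have hget : ∀ x ∈ bProd 1 (n+1), 0 ≤ x ∧ x < pvMOD :=
    bProd_mem (n+1-1).toNat 1 (n+1) le_rfl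
  have hrange : 0 ≤ (bProd 1 (n+1)).getD count.toNat 0
      ∧ (bProd 1 (n+1)).getD count.toNat 0 < pvMOD := by
    by_cases h : count.toNat < (bProd 1 (n+1)).length
    · rw [List.getD_eq_getElem _ _ h]
      exact hget _ (List.getElem_mem h)
    · rw [List.getD_eq_default _ _ (by omega)]
      exact ⟨le_rfl, pvPos⟩
  apply cast_inj_range _ _ hrange ⟨(pvC_range n.toNat count).1, (pvC_range n.toNat count).2⟩
  rw [bProd_coeff (n+1-1).toNat 1 (n+1) le_rfl count.toNat]
  have h2 := pvC_cast n.toNat count.toNat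
  rw [Int.toNat_of_nonneg (by omega : (0:Int) ≤ count)] at h2
  rw [h2, show ((n.toNat : Int)) + 1 = n + 1 from by omega]

-- ===== the degenerate cases =====

theorem caseA_smalln (n count : Int) (hn : n < 1) : solution n count = 0 := by
  simp only [solution]
  rw [PySem.List.pyRange_one_eq_nil (by omega)]
  simp only [List.foldl_nil]
  rfl

theorem caseA_smallcount (n count : Int) (hn : 1 ≤ n) (hc : count < 1) :
    solution n count = diagModel n n (if count < 0 then count + 101 else count) := by
  simp only [solution]
  have hrow : aRowBody count = fun dp (_ : Int) => dp := by
    funext dp i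
    unfold aRowBody
    rw [PySem.List.pyRange_one_eq_nil (by omega)]
    rfl
  obtain ⟨t, ht⟩ : ∃ t : Nat, (t:Int) = n := ⟨n.toNat, by omega⟩
  subst ht
  rw [hrow, pv_foldl_const, diag_fold t, if_neg (by omega)]

-- ===== VERDICT (by name: the statement is the Claim_ definition above) =====

theorem solution_spec : Claim_unchanged_solution := by
  intro n count _ hpre hnd
  obtain ⟨h1, h2, h3, h4⟩ := hpre
  by_cases hn : n < 1
  · rw [caseA_smalln n count hn]
    simp only [solution_alt]
    rw [if_pos (by omega)]
  · push_neg at hn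
    by_cases hc : count < 1
    · rw [caseA_smallcount n count hn hc]
      have hne : (if count < 0 then count + 101 else count) ≠ n := by
        by_cases h : count < 0
        · rw [if_pos h]
          intro he
          exact hnd (show D_solution n count from ⟨hn, h2, by omega⟩)
        · rw [if_neg h]
          omega
      simp only [diagModel]
      rw [if_neg (fun h => hne h.2.2), solution_alt, if_pos (by omega)]
    · push_neg at hc
      rw [mainA n count hn hc]
      by_cases hcn : count ≤ n
      · rw [mainB n count hn hc hcn]
      · simp only [solution_alt]
        rw [if_pos (by omega), pvC_gt n.toNat count (by omega)]

theorem solution_changed : Claim_changed_solution := by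
  unfold Claim_changed_solution
  refine ⟨by decide, by decide, by decide, ?_, by decide, by decide⟩
  show solution 1 (-100) = 1
  rw [caseA_smallcount 1 (-100) (by omega) (by omega)]
  norm_num [diagModel]

theorem solution_tight : Claim_exact_solution := by
  intro n count _ hpre hd
  have hd' : 1 ≤ n ∧ n ≤ 100 ∧ count = n - 101 := hd
  obtain ⟨hn1, hn2, hcd⟩ := hd'
  rw [caseA_smallcount n count hn1 (by omega),
    show (if count < 0 then count + 101 else count) = n from by rw [if_pos (by omega)]; omega]
  simp only [diagModel, solution_alt]
  rw [if_pos (show 1 ≤ n ∧ n ≤ n ∧ True from ⟨hn1, le_rfl, trivial⟩), if_pos (by omega)]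
  omega
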